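-- pv_equiv track=rewrite | github.com/DaviRaubach/prelude_for_organ | organi/materials/pitches/pitches_III.py | permut_thirds
-- ===== SOURCE A (Python) =====
-- def permut_thirds(pitches):
--     pitch_list = []
--     i = 0
--     pitch_list.append(pitches[i])
--     while i < len(pitches) - 2:
--         i = i + 2
--         note = pitches[i]
--         pitch_list.append(note)
--         i = i - 1
--         note = pitches[i]
--         pitch_list.append(note)
--     return pitch_list
-- ===== SOURCE B (Python) =====
-- def permut_thirds(pitches):
--     n = len(pitches)
--     return [pitches[0]] + [pitches[(k + 3) // 2 if k % 2 else k // 2]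
--                            for k in range(1, 2 * n - 3)]
-- ===== Notes on version B (the rewrite author's own statement) =====
-- stated objective: alternative
-- what changed: Replaces A's stateful index walk (i += 2 then i -= 1, appending in a while loop) by a closed-form index map: one comprehension over output positions k computing the source index arithmetically ((k+3)//2 for odd k, k//2 for even k).
import Mathlib
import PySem

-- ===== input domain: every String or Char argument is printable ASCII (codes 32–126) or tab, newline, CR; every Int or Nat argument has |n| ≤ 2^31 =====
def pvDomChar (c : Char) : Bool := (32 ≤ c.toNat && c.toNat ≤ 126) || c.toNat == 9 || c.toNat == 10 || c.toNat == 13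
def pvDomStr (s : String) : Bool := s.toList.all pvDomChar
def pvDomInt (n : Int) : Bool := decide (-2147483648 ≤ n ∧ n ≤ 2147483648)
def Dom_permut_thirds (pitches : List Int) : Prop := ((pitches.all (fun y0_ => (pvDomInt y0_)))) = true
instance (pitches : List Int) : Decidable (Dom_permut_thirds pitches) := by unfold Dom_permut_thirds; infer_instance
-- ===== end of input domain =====

-- B replaces A's stateful index walk (i += 2 then i -= 1 in a while loop) by a
-- closed-form index map over output positions k: source index (k+3)//2 for odd k,
-- k//2 for even k (alternative decomposition, same cost).

-- ===== PORT A =====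
-- the while loop: i is the Python loop index, acc the pitch_list so far
def permut_thirds_loop (pitches : List Int) (i : Int) (acc : List Int) : List Int :=
  if _h : i < (pitches.length : Int) - 2 then
    match PySem.List.pyGet? pitches (i + 2), PySem.List.pyGet? pitches (i + 1) with
    | some a, some b => permut_thirds_loop pitches (i + 1) (acc ++ [a] ++ [b])
    | _, _ => acc   -- IndexError: unreachable, since 0 ≤ i and the guard bounds i + 2 < length
  else acc
termination_by ((pitches.length : Int) - 2 - i).toNat
decreasing_by omega

def permut_thirds (pitches : List Int) : List Int :=
  match PySem.List.pyGet? pitches 0 with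
  | some x => permut_thirds_loop pitches 0 [x]
  | none => []   -- IndexError on pitches[0]: excluded by Pre_

-- ===== PORT B =====
def permut_thirds_alt (pitches : List Int) : List Int :=
  match PySem.List.pyGet? pitches 0 with
  | some x =>
      [x] ++ (PySem.List.pyRange 1 (2 * (pitches.length : Int) - 3) 1).map
        (fun k => (PySem.List.pyGet? pitches
            (if PySem.Int.mod k 2 ≠ 0 then PySem.Int.floordiv (k + 3) 2
             else PySem.Int.floordiv k 2)).getD 0)
        -- the index is always in range for k in range(1, 2n-3), so getD never fires
  | none => []   -- IndexError on pitches[0]: excluded by Pre_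

-- ===== PRECONDITION & SPEC =====
-- A (and B) raise IndexError on the empty list (pitches[0]); only that is excluded.
def Pre_permut_thirds (pitches : List Int) : Prop := pitches ≠ []
instance (pitches : List Int) : Decidable (Pre_permut_thirds pitches) := by
  unfold Pre_permut_thirds; infer_instance
def pvWitness_permut_thirds : List Int := [60, 62, 64, 65]

def Spec_permut_thirds (pitches : List Int) (out : List Int) : Prop := out = permut_thirds_alt pitches
instance (pitches : List Int) (out : List Int) : Decidable (Spec_permut_thirds pitches out) := by unfold Spec_permut_thirds; infer_instance

-- ===== CLAIM (what is proved, stated in full; the proofs are below) =====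
def Claim_equal_permut_thirds : Prop := ∀ (pitches : List Int), Dom_permut_thirds pitches → Pre_permut_thirds pitches → Spec_permut_thirds pitches (permut_thirds pitches)

-- ===== LEMMAS AND PROOFS =====

-- the common interleaving of the tail t = pitches[1:]: [t₁, t₀, t₂, t₁, …]
def pvIvl : List Int → List Int
  | a :: b :: rest => b :: a :: pvIvl (b :: rest)
  | _ => []

-- A's loop from state i appends pvIvl of pitches[(i+1):]
theorem permut_thirds_loop_eq (pitches : List Int) :
    ∀ (k : Nat) (i : Nat) (acc : List Int), pitches.length ≤ i + 2 + k →
      permut_thirds_loop pitches (i : Int) acc = acc ++ pvIvl (pitches.drop (i + 1)) := by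
  intro k
  induction k with
  | zero =>
    intro i acc hk
    rw [permut_thirds_loop]
    have hguard : ¬ ((i : Int) < (pitches.length : Int) - 2) := by omega
    rw [dif_neg hguard]
    have : pitches.drop (i + 1) = [] ∨ ∃ x, pitches.drop (i + 1) = [x] := by
      have hlen : (pitches.drop (i + 1)).length ≤ 1 := by
        simp [List.length_drop]; omega
      cases h : pitches.drop (i + 1) with
      | nil => exact Or.inl rfl
      | cons x t =>
        right
        cases t with
        | nil => exact ⟨x, rfl⟩
        | cons y t' => rw [h] at hlen; simp at hlen
    rcases this with h | ⟨x, h⟩ <;> simp [h, pvIvl]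
  | succ k ih =>
    intro i acc hk
    rw [permut_thirds_loop]
    by_cases hguard : (i : Int) < (pitches.length : Int) - 2
    · have hi2 : i + 2 < pitches.length := by push_cast at hguard; omega
      have hi1 : i + 1 < pitches.length := by omega
      have e2 : PySem.List.pyGet? pitches ((i : Int) + 2) = some pitches[i + 2] := by
        have : (i : Int) + 2 = ((i + 2 : Nat) : Int) := by push_cast; ring
        rw [this, PySem.List.pyGet?_natCast, List.getElem?_eq_getElem hi2]
      have e1 : PySem.List.pyGet? pitches ((i : Int) + 1) = some pitches[i + 1] := by
        have : (i : Int) + 1 = ((i + 1 : Nat) : Int) := by push_cast; ring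
        rw [this, PySem.List.pyGet?_natCast, List.getElem?_eq_getElem hi1]
      rw [dif_pos hguard, e2, e1]
      show permut_thirds_loop pitches ((i : Int) + 1) (acc ++ [pitches[i + 2]] ++ [pitches[i + 1]])
            = acc ++ pvIvl (List.drop (i + 1) pitches)
      have hcast : (i : Int) + 1 = ((i + 1 : Nat) : Int) := by push_cast; ring
      rw [hcast, ih (i + 1) _ (by omega)]
      have hd1 : pitches.drop (i + 1) = pitches[i + 1] :: pitches.drop (i + 2) := by
        rw [List.drop_eq_getElem_cons hi1]
      have hd2 : pitches.drop (i + 2) = pitches[i + 2] :: pitches.drop (i + 3) := by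
        rw [List.drop_eq_getElem_cons hi2]
      rw [hd1, hd2, pvIvl]
      rw [← hd2]
      simp
    · rw [dif_neg hguard]
      push_cast at hguard
      have : pitches.drop (i + 1) = [] ∨ ∃ x, pitches.drop (i + 1) = [x] := by
        have hlen : (pitches.drop (i + 1)).length ≤ 1 := by
          simp [List.length_drop]; omega
        cases h : pitches.drop (i + 1) with
        | nil => exact Or.inl rfl
        | cons x t =>
          right
          cases t with
          | nil => exact ⟨x, rfl⟩
          | cons y t' => rw [h] at hlen; simp at hlen
      rcases this with h | ⟨x, h⟩ <;> simp [h, pvIvl]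

-- Nat form of B's per-position source index (for k = 1 + j, j : Nat)
def pvBIdx (j : Nat) : Nat := if j % 2 = 0 then j / 2 + 2 else (j + 1) / 2

-- B's mapped function at k = 1 + j computes pitches[pvBIdx j]
theorem pvBfun_eq (p : List Int) (j : Nat) :
    (PySem.List.pyGet? p
        (if PySem.Int.mod (1 + (j : Int)) 2 ≠ 0 then PySem.Int.floordiv ((1 + (j : Int)) + 3) 2
         else PySem.Int.floordiv (1 + (j : Int)) 2)).getD 0
      = (p[pvBIdx j]?).getD 0 := by
  have hmod : PySem.Int.mod (1 + (j : Int)) 2 = (((1 + j) % 2 : Nat) : Int) := by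
    exact_mod_cast PySem.Int.mod_natCast (1 + j) 2
  have hf1 : PySem.Int.floordiv ((1 + (j : Int)) + 3) 2 = (((j + 4) / 2 : Nat) : Int) := by
    have : (1 + (j : Int)) + 3 = ((j + 4 : Nat) : Int) := by push_cast; ring
    rw [this]; exact_mod_cast PySem.Int.floordiv_natCast (j + 4) 2
  have hf2 : PySem.Int.floordiv (1 + (j : Int)) 2 = (((1 + j) / 2 : Nat) : Int) := by
    exact_mod_cast PySem.Int.floordiv_natCast (1 + j) 2
  rw [hmod, hf1, hf2]
  unfold pvBIdx
  rcases Nat.even_or_odd j with ⟨m, hm⟩ | ⟨m, hm⟩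
  · have h1 : ((1 + j) % 2 : Nat) = 1 := by omega
    have h2 : ((j + 4) / 2 : Nat) = j / 2 + 2 := by omega
    have h3 : (j % 2 : Nat) = 0 := by omega
    rw [h1, h2, h3]
    simp
    rw [show ((j : Int) / 2 + 2) = (((j / 2 + 2 : Nat)) : Int) by omega,
       PySem.List.pyGet?_natCast]
  · have h1 : ((1 + j) % 2 : Nat) = 0 := by omega
    have h2 : ((1 + j) / 2 : Nat) = (j + 1) / 2 := by omega
    have h3 : ¬ ((j % 2 : Nat) = 0) := by omega
    rw [h1, h2, if_neg h3]
    simp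
    rw [show (((j : Int) + 1) / 2) = ((((j + 1) / 2 : Nat)) : Int) by omega,
       PySem.List.pyGet?_natCast]

-- index shift: the same position two steps later looks one element deeper
theorem pvBIdx_add_two (j : Nat) : pvBIdx (j + 2) = pvBIdx j + 1 := by
  unfold pvBIdx
  rcases Nat.even_or_odd j with ⟨m, hm⟩ | ⟨m, hm⟩ <;> [skip; skip] <;>
    · have := hm
      split_ifs <;> omega

-- B's map over output positions produces the interleaving of the tail
theorem pvMap_range_eq_pvIvl :
    ∀ (t : List Int) (x : Int),
      (List.range (2 * t.length - 2)).map (fun j => ((x :: t)[pvBIdx j]?).getD 0) = pvIvl t := by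
  intro t
  induction t with
  | nil => intro x; simp [pvIvl]
  | cons a t' ih =>
    intro x
    cases t' with
    | nil => simp [pvIvl]
    | cons b r =>
      have hlen : 2 * (a :: b :: r).length - 2 = (2 * (b :: r).length - 2) + 2 := by
        simp [List.length_cons]; omega
      rw [hlen]
      have hsplit : List.range ((2 * (b :: r).length - 2) + 2)
          = [0, 1] ++ (List.range (2 * (b :: r).length - 2)).map (fun j => 2 + j) := by
        rw [Nat.add_comm, List.range_add]
        rfl
      rw [hsplit]
      simp only [List.map_append, List.map_cons, List.map_nil, List.map_map]
      have h0 : ((x :: a :: b :: r)[pvBIdx 0]?).getD 0 = b := by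
        simp [pvBIdx]
      have h1 : ((x :: a :: b :: r)[pvBIdx 1]?).getD 0 = a := by
        simp [pvBIdx]
      have hshift : ∀ j : Nat,
          ((x :: a :: b :: r)[pvBIdx (2 + j)]?).getD 0 = ((a :: b :: r)[pvBIdx j]?).getD 0 := by
        intro j
        rw [Nat.add_comm 2 j, pvBIdx_add_two]
        simp [List.getElem?_cons_succ]
      rw [h0, h1]
      show b :: a :: _ = pvIvl (a :: b :: r)
      rw [show pvIvl (a :: b :: r) = b :: a :: pvIvl (b :: r) from rfl]
      congr 1
      congr 1
      rw [← ih a]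
      apply List.map_congr_left
      intro j _
      exact hshift j

-- ===== VERDICT (by name: the statement is the Claim_ definition above) =====
theorem permut_thirds_spec : Claim_equal_permut_thirds := by
  intro pitches _hdom hpre
  unfold Spec_permut_thirds permut_thirds permut_thirds_alt
  cases pitches with
  | nil => exact absurd rfl hpre
  | cons x rest =>
    have h0 : PySem.List.pyGet? (x :: rest) (0 : Int) = some x := by simp
    rw [h0]
    dsimp only
    have hA := permut_thirds_loop_eq (x :: rest) ((x :: rest).length) 0 [x] (by omega)
    simp only [Nat.cast_zero] at hA
    rw [hA]
    have hrange : PySem.List.pyRange 1 (2 * ((x :: rest).length : Int) - 3) 1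
        = (List.range (2 * rest.length - 2)).map (fun k : Nat => 1 + (k : Int)) := by
      rw [PySem.List.pyRange_one]
      have hn : ((2 * ((x :: rest).length : Int) - 3) - 1).toNat = 2 * rest.length - 2 := by
        simp [List.length_cons]; omega
      rw [hn]
    rw [hrange, List.map_map]
    have hB : (List.range (2 * rest.length - 2)).map
        ((fun k => (PySem.List.pyGet? (x :: rest)
            (if PySem.Int.mod k 2 ≠ 0 then PySem.Int.floordiv (k + 3) 2
             else PySem.Int.floordiv k 2)).getD 0) ∘ (fun k : Nat => 1 + (k : Int)))
        = (List.range (2 * rest.length - 2)).map (fun j : Nat => ((x :: rest)[pvBIdx j]?).getD 0) := by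
      apply List.map_congr_left
      intro j _
      simp only [Function.comp]
      rw [pvBfun_eq (x :: rest) j]
    rw [hB, pvMap_range_eq_pvIvl rest x]
    simp [List.drop_zero]
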